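-- pv_equiv track=rewrite | github.com/pintom/google-foobar | Challenges/Challenge 1/solution_fail1of10.py | answer
-- ===== SOURCE A (Python) =====
-- def answer(s):
--     x = []
--     res = 1
--     s1 = s.lower().replace(" ", "")
--     s1 = "".join([i for i in s1 if not i.isdigit()])
--
--     for i in range(len(s1), 1, -1):
--         x = [s1[j:j + i] for j in range(0, len(s1), i)]
--         if len(set(x)) == 1:
--             res1 = len(s1) // i
--
--             if res < res1:
--                 res = res1
--     return res
-- ===== SOURCE B (Python) =====
-- def answer(s):
--     s1 = s.lower().replace(" ", "")
--     s1 = "".join(c for c in s1 if not c.isdigit())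
--     n = len(s1)
--     for d in range(2, n + 1):
--         if n % d == 0 and s1 == s1[:d] * (n // d):
--             return n // d
--     return 1
-- ===== Notes on version B (the rewrite author's own statement) =====
-- stated objective: faster
-- what changed: A tests every block length i from n down to 2 by materialising all chunks s1[j:j+i] and deduplicating them with set() (O(n) work for each of the n block lengths); B scans block lengths upward, tests only the divisors d of n by one prefix-tiling comparison s1 == s1[:d]*(n//d), and early-returns n//d at the first (smallest) tiling divisor.
import Mathlib
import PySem

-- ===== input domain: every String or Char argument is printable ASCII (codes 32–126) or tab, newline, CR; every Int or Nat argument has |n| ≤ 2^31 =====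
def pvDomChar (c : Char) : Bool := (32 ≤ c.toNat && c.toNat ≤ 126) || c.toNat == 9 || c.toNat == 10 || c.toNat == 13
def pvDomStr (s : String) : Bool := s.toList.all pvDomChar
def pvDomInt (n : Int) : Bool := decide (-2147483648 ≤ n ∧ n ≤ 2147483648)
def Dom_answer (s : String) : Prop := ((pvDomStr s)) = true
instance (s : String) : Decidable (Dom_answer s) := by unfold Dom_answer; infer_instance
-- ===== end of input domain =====

-- B replaces A's quadratic scan over all block lengths (chunk list + set() dedup per length)
-- by an ascending early-return scan over the divisors of the cleaned length, testing
-- s1 == s1[:d]*(n//d); objective: faster.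

-- ===== PORT A =====
def answer (s : String) : Int :=
  let s1 := PySem.Chars.replace (PySem.Chars.lower s.toList) [' '] []
  let s2 := s1.filter (fun c => !(PySem.Chars.isdigit c))
  (PySem.List.pyRange (PySem.List.len s2) 1 (-1)).foldl
    (fun res i =>
      let x := (PySem.List.pyRange 0 (PySem.List.len s2) i).map
        (fun j => PySem.List.slice s2 (some j) (some (j + i)))
      if PySem.Set.len (PySem.Set.ofList x) == 1 then
        let res1 := PySem.Int.floordiv (PySem.List.len s2) i
        if res < res1 then res1 else res
      else res)
    1

-- ===== PORT B =====
def answer_alt (s : String) : Int :=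
  let s1 := PySem.Chars.replace (PySem.Chars.lower s.toList) [' '] []
  let s2 := s1.filter (fun c => !(PySem.Chars.isdigit c))
  let n := s2.length
  match (List.range' 2 (n - 1)).findSome? (fun d =>
      if (n % d == 0) && (s2 == List.flatten (List.replicate (n / d) (s2.take d)))
      then some ((n / d : ℕ) : Int) else none) with
  | some r => r
  | none => 1

-- ===== PRECONDITION & SPEC =====
def Spec_answer (s : String) (out : Int) : Prop := out = answer_alt s
instance (s : String) (out : Int) : Decidable (Spec_answer s out) := by unfold Spec_answer; infer_instance

-- ===== CLAIM (what is proved, stated in full; the proofs are below) =====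
def Claim_equal_answer : Prop := ∀ (s : String), Dom_answer s → Spec_answer s (answer s)

-- ===== LEMMAS AND PROOFS =====

-- chunks of size i+1 (proof-side recursive view of A's slice comprehension)
def pvChunks (i : ℕ) : List Char → List (List Char)
  | [] => []
  | c :: cs => ((c :: cs).take (i+1)) :: pvChunks i (cs.drop i)
termination_by l => l.length
decreasing_by simp

theorem pv_findSome?_if {α β : Type} (p : α → Bool) (g : α → β) (L : List α) :
    L.findSome? (fun d => if p d then some (g d) else none) = (L.find? p).map g := by
  induction L with
  | nil => rfl
  | cons a L ih => by_cases h : p a = true <;> simp [h, ih]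

theorem pv_find?_range'_min (p : ℕ → Bool) :
    ∀ (m a d : ℕ), (List.range' a m).find? p = some d →
      p d = true ∧ a ≤ d ∧ d < a + m ∧ ∀ e, a ≤ e → e < d → p e = false := by
  intro m
  induction m with
  | zero => intro a d h; simp at h
  | succ m ih =>
    intro a d h
    rw [List.range'_succ, List.find?_cons] at h
    cases hp : p a with
    | true =>
      rw [hp] at h
      simp only [Option.some.injEq] at h
      subst h
      exact ⟨hp, le_refl _, by omega, fun e he1 he2 => by omega⟩
    | false =>
      rw [hp] at h
      obtain ⟨h1, h2, h3, h4⟩ := ih (a+1) d h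
      refine ⟨h1, by omega, by omega, fun e he1 he2 => ?_⟩
      by_cases hea : e = a
      · subst hea; exact hp
      · exact h4 e (by omega) he2

theorem pv_fold_ge_init (c : ℤ → Bool) (v : ℤ → ℤ) :
    ∀ (L : List ℤ) (r0 : ℤ),
      r0 ≤ L.foldl (fun res i => if c i then (if res < v i then v i else res) else res) r0 := by
  intro L
  induction L with
  | nil => intro r0; simp
  | cons a L ih =>
    intro r0
    simp only [List.foldl_cons]
    refine le_trans ?_ (ih _)
    split_ifs <;> omega

theorem pv_fold_ge_cand (c : ℤ → Bool) (v : ℤ → ℤ) :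
    ∀ (L : List ℤ) (r0 i : ℤ), i ∈ L → c i = true →
      v i ≤ L.foldl (fun res i => if c i then (if res < v i then v i else res) else res) r0 := by
  intro L
  induction L with
  | nil => intro r0 i h; simp at h
  | cons a L ih =>
    intro r0 i h hc
    simp only [List.foldl_cons]
    rcases List.mem_cons.mp h with h | h
    · subst h
      refine le_trans ?_ (pv_fold_ge_init c v L _)
      rw [if_pos hc]; split_ifs <;> omega
    · exact ih _ i h hc

theorem pv_fold_cases (c : ℤ → Bool) (v : ℤ → ℤ) :
    ∀ (L : List ℤ) (r0 : ℤ),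
      L.foldl (fun res i => if c i then (if res < v i then v i else res) else res) r0 = r0 ∨
      ∃ i ∈ L, c i = true ∧
        L.foldl (fun res i => if c i then (if res < v i then v i else res) else res) r0 = v i := by
  intro L
  induction L with
  | nil => intro r0; left; rfl
  | cons a L ih =>
    intro r0
    simp only [List.foldl_cons]
    rcases ih (if c a then (if r0 < v a then v a else r0) else r0) with h | ⟨i, hi, hci, hvi⟩
    · rw [h]
      by_cases hca : c a = true
      · by_cases hlt : r0 < v a
        · right; exact ⟨a, List.mem_cons_self, hca, by rw [if_pos hca, if_pos hlt]⟩
        · left; rw [if_pos hca, if_neg hlt]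
      · left; rw [if_neg hca]
    · right; exact ⟨i, List.mem_cons_of_mem _ hi, hci, hvi⟩

theorem pv_pyRange_pos_cons (a b s : ℤ) (hs : 0 < s) (hab : a < b) :
    PySem.List.pyRange a b s = a :: PySem.List.pyRange (a + s) b s := by
  rw [PySem.List.pyRange_of_pos _ _ hs, PySem.List.pyRange_of_pos _ _ hs, if_pos hab]
  have harith : b - a + s - 1 = (b - a - 1) + 1 * s := by ring
  have hkey : (b - a + s - 1) / s = (b - a - 1) / s + 1 := by
    rw [harith, Int.add_mul_ediv_right _ _ (by omega : s ≠ 0)]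
  have hx0 : 0 ≤ (b - a - 1) / s := Int.ediv_nonneg (by omega) (by omega)
  by_cases hab2 : a + s < b
  · rw [if_pos hab2, hkey]
    have : ((b - a - 1) / s + 1).toNat = ((b - a - 1) / s).toNat + 1 := by omega
    rw [this, List.range_succ_eq_map, List.map_cons, List.map_map]
    have hinner : b - (a + s) + s - 1 = b - a - 1 := by ring
    rw [hinner]
    refine congrArg₂ _ (by ring) ?_
    refine List.map_congr_left (fun k _ => ?_)
    simp only [Function.comp_apply, Nat.succ_eq_add_one]
    push_cast
    ring
  · rw [if_neg hab2, hkey]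
    have hz : (b - a - 1) / s = 0 := Int.ediv_eq_zero_of_lt (by omega) (by omega)
    rw [hz]
    simp

theorem pv_pyRange_pos_nil (a b s : ℤ) (hs : 0 < s) (hab : b ≤ a) :
    PySem.List.pyRange a b s = [] := by
  rw [PySem.List.pyRange_of_pos _ _ hs, if_neg (not_lt.mpr hab)]
  rfl

theorem pv_pyRange_shift (a b s : ℤ) (hs : 0 < s) :
    PySem.List.pyRange a b s = (PySem.List.pyRange 0 (b - a) s).map (· + a) := by
  rw [PySem.List.pyRange_of_pos _ _ hs, PySem.List.pyRange_of_pos _ _ hs, List.map_map]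
  have hcount : (if 0 < b - a then ((b - a - 0 + s - 1) / s).toNat else 0)
      = (if a < b then ((b - a + s - 1) / s).toNat else 0) := by
    have hin : b - a - 0 + s - 1 = b - a + s - 1 := by ring
    rw [hin]
    exact if_congr (by omega) rfl rfl
  rw [hcount]
  refine List.map_congr_left (fun k _ => ?_)
  simp only [Function.comp_apply]
  ring

theorem pv_chunks_map (i : ℕ) (hi : 1 ≤ i) :
    ∀ (l : List Char),
      (PySem.List.pyRange 0 (PySem.List.len l) (i : ℤ)).map
          (fun j => PySem.List.slice l (some j) (some (j + (i : ℤ)))) = pvChunks (i - 1) l := by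
  suffices H : ∀ (n : ℕ) (l : List Char), l.length ≤ n →
      (PySem.List.pyRange 0 (PySem.List.len l) (i : ℤ)).map
        (fun j => PySem.List.slice l (some j) (some (j + (i : ℤ)))) = pvChunks (i - 1) l by
    exact fun l => H l.length l (le_refl _)
  intro n
  induction n with
  | zero =>
    intro l hl
    have hnil : l = [] := List.eq_nil_of_length_eq_zero (by omega)
    subst hnil
    rw [PySem.List.len_eq]
    simp only [List.length_nil, Nat.cast_zero]
    rw [pv_pyRange_pos_nil 0 0 (i : ℤ) (by exact_mod_cast hi) (le_refl _)]
    simp [pvChunks]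
  | succ n ih =>
    intro l hl
    match l with
    | [] =>
      rw [PySem.List.len_eq]
      simp only [List.length_nil, Nat.cast_zero]
      rw [pv_pyRange_pos_nil 0 0 (i : ℤ) (by exact_mod_cast hi) (le_refl _)]
      simp [pvChunks]
    | c :: cs =>
      have hslen : (0 : ℤ) < (i : ℤ) := by exact_mod_cast hi
      have hN : 0 < (c :: cs).length := by simp
      rw [PySem.List.len_eq]
      rw [pv_pyRange_pos_cons 0 _ _ hslen (by exact_mod_cast hN)]
      rw [List.map_cons]
      have hhead : PySem.List.slice (c :: cs) (some 0) (some (0 + (i : ℤ)))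
          = (c :: cs).take ((i - 1) + 1) := by
        rw [PySem.List.slice_toNat _ (le_refl 0) (by omega)]
        simp only [Int.toNat_zero, List.drop_zero, zero_add, Int.toNat_natCast]
        congr 1
        omega
      rw [hhead]
      conv_rhs => rw [pvChunks]
      congr 1
      · rw [zero_add, pv_pyRange_shift _ _ _ hslen, List.map_map]
        have hdropeq : cs.drop (i - 1) = (c :: cs).drop i := by
          match i, hi with
          | (k + 1), _ => simp
        by_cases hin : i ≤ (c :: cs).length
        · have hcast : ((c :: cs).length : ℤ) - (i : ℤ) = (((c :: cs).length - i : ℕ) : ℤ) := by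
            omega
          rw [hcast]
          have hstep : ∀ j ∈ PySem.List.pyRange 0 (((c :: cs).length - i : ℕ) : ℤ) (i : ℤ),
              ((fun j => PySem.List.slice (c :: cs) (some j) (some (j + (i : ℤ)))) ∘ (· + (i : ℤ))) j
                = PySem.List.slice ((c :: cs).drop i) (some j) (some (j + (i : ℤ))) := by
            intro j hj
            obtain ⟨hj0, _, _⟩ := (PySem.List.mem_pyRange_iff_of_pos hslen j).mp hj
            simp only [Function.comp_apply]
            rw [PySem.List.slice_toNat _ (by omega) (by omega),
                PySem.List.slice_toNat _ (by omega) (by omega)]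
            rw [List.drop_drop]
            have h1 : (j + (i : ℤ)).toNat = j.toNat + i := by omega
            rw [h1]
            congr 1
            · omega
            · congr 1
              omega
          rw [List.map_congr_left hstep]
          have hIH := ih ((c :: cs).drop i) (by
            rw [List.length_drop]
            simp only [List.length_cons] at hl ⊢
            omega)
          rw [PySem.List.len_eq] at hIH
          have hlen : (((c :: cs).drop i).length : ℤ) = (((c :: cs).length - i : ℕ) : ℤ) := by
            simp
          rw [hlen] at hIH
          rw [hIH, hdropeq]
        · have hnil2 : ((c :: cs).length : ℤ) - (i : ℤ) ≤ 0 := by omega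
          rw [pv_pyRange_pos_nil _ _ _ hslen hnil2]
          have : cs.drop (i - 1) = [] := List.drop_eq_nil_of_le (by simp at hin ⊢; omega)
          rw [this]
          simp [pvChunks]

theorem pv_chunks_all_eq (s : ℕ) (hs : 1 ≤ s) (t : List Char) (ht : t.length = s) :
    ∀ (l : List Char), (∀ ch ∈ pvChunks (s - 1) l, ch = t) →
      l = List.flatten (List.replicate (l.length / s) t) ∧ s ∣ l.length := by
  suffices H : ∀ (n : ℕ) (l : List Char), l.length ≤ n → (∀ ch ∈ pvChunks (s - 1) l, ch = t) →
      l = List.flatten (List.replicate (l.length / s) t) ∧ s ∣ l.length by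
    exact fun l => H l.length l (le_refl _)
  intro n
  induction n with
  | zero =>
    intro l hl _
    have hnil : l = [] := List.eq_nil_of_length_eq_zero (by omega)
    subst hnil
    simp
  | succ n ih =>
    intro l hl h
    match l with
    | [] => simp
    | c :: cs =>
      rw [pvChunks] at h
      have hs1 : (s - 1) + 1 = s := by omega
      rw [hs1] at h
      have hfirst : (c :: cs).take s = t := h _ (List.mem_cons_self)
      have hlen : s ≤ (c :: cs).length := by
        have := congrArg List.length hfirst
        simp only [List.length_take] at this
        omega
      have hdropeq : cs.drop (s - 1) = (c :: cs).drop s := by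
        match s, hs with
        | (k + 1), _ => simp
      rw [hdropeq] at h
      have hrest : ∀ ch ∈ pvChunks (s - 1) ((c :: cs).drop s), ch = t := by
        intro ch hch
        exact h ch (List.mem_cons_of_mem _ hch)
      obtain ⟨hrep, hdvd⟩ := ih ((c :: cs).drop s) (by
        rw [List.length_drop]
        simp only [List.length_cons] at hl ⊢
        omega) hrest
      have hN : (c :: cs).length = ((c :: cs).length - s) + s := by omega
      constructor
      · have hdiv : (c :: cs).length / s = ((c :: cs).length - s) / s + 1 := by
          have h2 := Nat.add_div_right ((c :: cs).length - s) (by omega : 0 < s)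
          rw [← hN] at h2; exact h2
        rw [hdiv, List.replicate_succ, List.flatten_cons]
        calc c :: cs = (c :: cs).take s ++ (c :: cs).drop s := by rw [List.take_append_drop]
          _ = t ++ List.flatten (List.replicate (((c :: cs).length - s) / s) t) := by
              rw [List.length_drop] at hrep
              rw [hfirst, ← hrep]
      · conv_rhs => rw [hN]
        rw [List.length_drop] at hdvd
        exact Nat.dvd_add hdvd (dvd_refl s)

theorem pv_chunks_of_replicate (s : ℕ) (hs : 1 ≤ s) (t : List Char) (ht : t.length = s) :
    ∀ (k : ℕ), pvChunks (s - 1) (List.flatten (List.replicate k t)) = List.replicate k t := by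
  intro k
  induction k with
  | zero => simp [pvChunks]
  | succ k ih =>
    rw [List.replicate_succ, List.flatten_cons]
    match t, ht, ih with
    | [], ht0, _ => simp at ht0; omega
    | c :: t', ht0, ih =>
      rw [List.cons_append, pvChunks]
      have hs1 : (s - 1) + 1 = s := by omega
      have ht' : t'.length = s - 1 := by
        simp only [List.length_cons] at ht0
        omega
      rw [hs1]
      have htake : ((c :: t') ++ List.flatten (List.replicate k (c :: t'))).take s = c :: t' := by
        rw [show s = (c :: t').length from ht0.symm, List.take_left]
      have hdrop : (t' ++ List.flatten (List.replicate k (c :: t'))).drop (s - 1)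
          = List.flatten (List.replicate k (c :: t')) := by
        rw [← ht', List.drop_left]
      rw [← List.cons_append, htake, hdrop, ih]

theorem pv_setLen1_iff (x : List (List Char)) :
    ((PySem.Set.len (PySem.Set.ofList x) == 1) = true) ↔ ∃ t, x ≠ [] ∧ ∀ a ∈ x, a = t := by
  have haux : ∀ (xs : List (List Char)) (t : List Char), (∀ a ∈ xs, a = t) →
      xs.foldl PySem.Set.add [t] = [t] := by
    intro xs
    induction xs with
    | nil => intro t _; rfl
    | cons a xs ih =>
      intro t h
      have ha : a = t := h a (by simp)
      subst ha
      simp only [List.foldl_cons]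
      have hadd : PySem.Set.add [a] a = [a] := by
        simp [PySem.Set.add, PySem.Set.contains]
      rw [hadd]
      exact ih a (fun b hb => h b (by simp [hb]))
  constructor
  · intro h
    have hlen : (PySem.Set.ofList x).length = 1 := by
      simp only [PySem.Set.len, beq_iff_eq] at h
      exact_mod_cast h
    obtain ⟨t, ht⟩ := List.length_eq_one_iff.mp hlen
    refine ⟨t, ?_, ?_⟩
    · intro hnil
      subst hnil
      rw [PySem.Set.ofList_eq_foldl] at ht
      simp at ht
    · intro a ha
      have hm : a ∈ PySem.Set.ofList x := (PySem.Set.mem_ofList x a).mpr ha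
      rw [ht] at hm
      simpa using hm
  · rintro ⟨t, hne, hall⟩
    have hofl : PySem.Set.ofList x = [t] := by
      match x, hne with
      | a :: xs, _ =>
        have ha : a = t := hall a (by simp)
        subst ha
        rw [PySem.Set.ofList_eq_foldl]
        simp only [List.foldl_cons]
        have hadd : PySem.Set.add ([] : PySem.Set (List Char)) a = [a] := by
          simp [PySem.Set.add, PySem.Set.contains]
        rw [hadd]
        exact haux xs a (fun b hb => hall b (by simp [hb]))
    rw [hofl]
    rfl

theorem pv_floordiv_natCast (a b : ℕ) :
    PySem.Int.floordiv (a : ℤ) (b : ℤ) = ((a / b : ℕ) : ℤ) := by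
  simp [PySem.Int.floordiv, Int.fdiv_eq_ediv]

theorem pv_condA_iff (l : List Char) (s : ℕ) (h2 : 2 ≤ s) (hn : s ≤ l.length) :
    ((PySem.Set.len (PySem.Set.ofList ((PySem.List.pyRange 0 (PySem.List.len l) (s : ℤ)).map
        (fun j => PySem.List.slice l (some j) (some (j + (s : ℤ)))))) == 1) = true) ↔
      (s ∣ l.length ∧ l = List.flatten (List.replicate (l.length / s) (l.take s))) := by
  rw [pv_chunks_map s (by omega) l, pv_setLen1_iff]
  have htake : (l.take s).length = s := by
    rw [List.length_take]
    omega
  constructor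
  · rintro ⟨t, hne, hall⟩
    have hteq : l.take s = t := by
      match l, hne with
      | c :: cs, _ =>
        rw [pvChunks] at hall
        have hs1 : (s - 1) + 1 = s := by omega
        rw [hs1] at hall
        exact hall _ List.mem_cons_self
      | [], hne0 => exact absurd (by simp [pvChunks]) hne0
    obtain ⟨hrep, hdvd⟩ := pv_chunks_all_eq s (by omega) t (by rw [← hteq, htake]) l hall
    rw [hteq]
    exact ⟨hdvd, hrep⟩
  · rintro ⟨hdvd, hrep⟩
    have hchunks : pvChunks (s - 1) l = List.replicate (l.length / s) (l.take s) := by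
      conv_lhs => rw [hrep]
      exact pv_chunks_of_replicate s (by omega) (l.take s) htake (l.length / s)
    have hpos : 1 ≤ l.length / s := (Nat.one_le_div_iff (by omega)).mpr hn
    refine ⟨l.take s, ?_, ?_⟩
    · rw [hchunks]
      simp only [ne_eq, List.replicate_eq_nil_iff]
      omega
    · intro a ha
      rw [hchunks] at ha
      exact List.eq_of_mem_replicate ha

theorem pv_main (l : List Char) :
    (PySem.List.pyRange (PySem.List.len l) 1 (-1)).foldl
      (fun res i =>
        let x := (PySem.List.pyRange 0 (PySem.List.len l) i).map
          (fun j => PySem.List.slice l (some j) (some (j + i)))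
        if PySem.Set.len (PySem.Set.ofList x) == 1 then
          let res1 := PySem.Int.floordiv (PySem.List.len l) i
          if res < res1 then res1 else res
        else res)
      1 =
    (match (List.range' 2 (l.length - 1)).findSome? (fun d =>
        if (l.length % d == 0) && (l == List.flatten (List.replicate (l.length / d) (l.take d)))
        then some ((l.length / d : ℕ) : Int) else none) with
      | some r => r
      | none => 1) := by
  have hlen : PySem.List.len l = (l.length : ℤ) := PySem.List.len_eq l
  set cf : ℤ → Bool := fun i =>
    (PySem.Set.len (PySem.Set.ofList ((PySem.List.pyRange 0 (PySem.List.len l) i).map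
      (fun j => PySem.List.slice l (some j) (some (j + i))))) == 1) with hcf
  set vf : ℤ → ℤ := fun i => PySem.Int.floordiv (PySem.List.len l) i with hvf
  have hshape : (PySem.List.pyRange (PySem.List.len l) 1 (-1)).foldl
      (fun res i =>
        let x := (PySem.List.pyRange 0 (PySem.List.len l) i).map
          (fun j => PySem.List.slice l (some j) (some (j + i)))
        if PySem.Set.len (PySem.Set.ofList x) == 1 then
          let res1 := PySem.Int.floordiv (PySem.List.len l) i
          if res < res1 then res1 else res
        else res)
      1 = (PySem.List.pyRange (PySem.List.len l) 1 (-1)).foldl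
      (fun res i => if cf i then (if res < vf i then vf i else res) else res) 1 := rfl
  rw [hshape]
  rw [pv_findSome?_if
    (fun d => (l.length % d == 0) && (l == List.flatten (List.replicate (l.length / d) (l.take d))))
    (fun d => ((l.length / d : ℕ) : Int)) (List.range' 2 (l.length - 1))]
  set P : ℕ → Bool := fun d =>
    (l.length % d == 0) && (l == List.flatten (List.replicate (l.length / d) (l.take d))) with hP
  by_cases hn2 : l.length ≤ 1
  · have h0 : l.length - 1 = 0 := by omega
    rw [h0]
    simp only [List.range'_zero, List.find?_nil, Option.map_none]
    rw [hlen]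
    rw [PySem.List.pyRange_neg_one_eq_nil (by exact_mod_cast hn2)]
    rfl
  · have hn2' : 2 ≤ l.length := by omega
    have hPn : P l.length = true := by
      simp only [hP, Nat.mod_self, Nat.div_self (by omega : 0 < l.length),
        List.replicate_one, List.flatten_cons, List.flatten_nil, List.append_nil,
        List.take_length, beq_self_eq_true, Bool.and_self]
    have hfind_ne : (List.range' 2 (l.length - 1)).find? P ≠ none := by
      intro hnone
      exact absurd hPn (by
        simpa using (List.find?_eq_none.mp hnone) l.length
          (List.mem_range'_1.mpr ⟨hn2', by omega⟩))
    obtain ⟨d0, hfind⟩ := Option.ne_none_iff_exists'.mp hfind_ne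
    obtain ⟨hPd0, hd02, hd0n, hmin⟩ := pv_find?_range'_min P (l.length - 1) 2 d0 hfind
    have hPd0' := hPd0
    simp only [hP, Bool.and_eq_true, beq_iff_eq] at hPd0'
    obtain ⟨hmod, hrep⟩ := hPd0'
    have hdvd : d0 ∣ l.length := Nat.dvd_of_mod_eq_zero hmod
    have hd0pos : 0 < d0 := by omega
    have hd0len : d0 ≤ l.length := Nat.le_of_dvd (by omega) hdvd
    rw [hfind, Option.map_some]
    show _ = ((l.length / d0 : ℕ) : ℤ)
    have hvald0 : vf (d0 : ℤ) = ((l.length / d0 : ℕ) : ℤ) := by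
      rw [hvf]
      simp only [hlen]
      exact pv_floordiv_natCast l.length d0
    have hcd0 : cf (d0 : ℤ) = true := by
      rw [hcf]
      exact (pv_condA_iff l d0 hd02 hd0len).mpr ⟨hdvd, hrep⟩
    have hq1 : 1 ≤ l.length / d0 := (Nat.one_le_div_iff hd0pos).mpr hd0len
    apply le_antisymm
    · rcases pv_fold_cases cf vf (PySem.List.pyRange (PySem.List.len l) 1 (-1)) 1 with
        hc | ⟨i, hiL, hci, hval⟩
      · rw [hc]
        exact_mod_cast hq1
      · rw [hval]
        rw [hlen] at hiL
        obtain ⟨hi1, hin⟩ := PySem.List.mem_pyRange_neg_one.mp hiL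
        have hsi : ((i.toNat : ℤ)) = i := by omega
        have hsi2 : 2 ≤ i.toNat := by omega
        have hsin : i.toNat ≤ l.length := by omega
        rw [← hsi] at hci
        rw [hcf] at hci
        obtain ⟨hdvd2, hrep2⟩ := (pv_condA_iff l i.toNat hsi2 hsin).mp hci
        have hd0si : d0 ≤ i.toNat := by
          by_contra hcon
          have hPsi : P i.toNat = true := by
            simp only [hP, Bool.and_eq_true, beq_iff_eq]
            exact ⟨Nat.mod_eq_zero_of_dvd hdvd2, hrep2⟩
          exact absurd hPsi (by simp [hmin i.toNat (by omega) (by omega)])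
        have hdivle : l.length / i.toNat ≤ l.length / d0 :=
          Nat.div_le_div_left hd0si hd0pos
        rw [← hsi, hvf]
        simp only [hlen]
        rw [pv_floordiv_natCast l.length i.toNat]
        exact_mod_cast hdivle
    · have hmem : ((d0 : ℤ)) ∈ PySem.List.pyRange (PySem.List.len l) 1 (-1) := by
        rw [hlen]
        exact PySem.List.mem_pyRange_neg_one.mpr
          ⟨by exact_mod_cast hd02, by exact_mod_cast hd0len⟩
      have := pv_fold_ge_cand cf vf (PySem.List.pyRange (PySem.List.len l) 1 (-1)) 1 (d0 : ℤ)
        hmem hcd0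
      rw [hvald0] at this
      exact this

-- ===== VERDICT (by name: the statement is the Claim_ definition above) =====
theorem answer_spec : Claim_equal_answer := by
  intro s _
  unfold Spec_answer answer answer_alt
  exact pv_main _
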